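-- pv_equiv track=rewrite | github.com/DannyJPN/PhotoBankingScripts | givephotobankreadymediafiles/givephotobankreadymediafileslib/metadata_generator.py | _find_best_category_match
-- ===== SOURCE A (Python) =====
-- from typing import Dict, Any, List, Optional, Union
--
-- def _find_best_category_match(target: str, available: List[str]) -> Optional[str]:
--     """Find best matching category from available list."""
--     target_lower = target.lower()
--
--     # Exact match first
--     for cat in available:
--         if cat.lower() == target_lower:
--             return cat
--
--     # Partial match
--     for cat in available:
--         if target_lower in cat.lower() or cat.lower() in target_lower:
--             return cat
--
--     return None
-- ===== SOURCE B (Python) =====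
-- def _find_best_category_match(target, available):
--     """Single pass: return on exact match, remember first partial candidate."""
--     target_lower = target.lower()
--     candidate = None
--     for cat in available:
--         cat_lower = cat.lower()
--         if cat_lower == target_lower:
--             return cat
--         if candidate is None and (target_lower in cat_lower or cat_lower in target_lower):
--             candidate = cat
--     return candidate
-- ===== Notes on version B (the rewrite author's own statement) =====
-- stated objective: alternative
-- what changed: Fuses A's two sequential passes into one loop that returns on an exact match and carries the first partial-match candidate, returned at the end.
import Mathlib
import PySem

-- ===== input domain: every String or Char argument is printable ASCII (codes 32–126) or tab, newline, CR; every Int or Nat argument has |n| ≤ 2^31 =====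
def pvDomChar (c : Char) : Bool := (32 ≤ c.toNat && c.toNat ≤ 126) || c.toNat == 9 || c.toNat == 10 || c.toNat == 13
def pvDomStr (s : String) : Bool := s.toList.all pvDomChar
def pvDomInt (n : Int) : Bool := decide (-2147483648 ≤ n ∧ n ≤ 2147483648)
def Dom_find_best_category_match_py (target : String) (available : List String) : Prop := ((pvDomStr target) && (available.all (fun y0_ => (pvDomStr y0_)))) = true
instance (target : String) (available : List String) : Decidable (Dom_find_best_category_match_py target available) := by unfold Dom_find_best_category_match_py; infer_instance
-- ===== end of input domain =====

-- B fuses A's two sequential scans into one loop that returns on an exact match and carries the first partial candidate (alternative decomposition, same cost).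


-- ===== PORT A =====
-- loop 1: first exact (case-insensitive) match; loop 2: first partial match; else None
def find_best_category_match_py (target : String) (available : List String) : Option String :=
  let target_lower := PySem.Str.lower target
  match available.find? (fun cat => PySem.Str.lower cat == target_lower) with
  | some cat => some cat
  | none =>
      available.find? (fun cat =>
        PySem.Str.isIn target_lower (PySem.Str.lower cat) ||
        PySem.Str.isIn (PySem.Str.lower cat) target_lower)

-- ===== PORT B =====
-- single loop carrying the first partial candidate; returns immediately on exact match
def pvAltLoop (target_lower : String) (candidate : Option String) : List String → Option String
  | [] => candidate
  | cat :: rest =>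
      let cat_lower := PySem.Str.lower cat
      if cat_lower == target_lower then some cat
      else
        pvAltLoop target_lower
          (if candidate.isNone &&
              (PySem.Str.isIn target_lower cat_lower || PySem.Str.isIn cat_lower target_lower)
           then some cat else candidate) rest

def find_best_category_match_py_alt (target : String) (available : List String) : Option String :=
  pvAltLoop (PySem.Str.lower target) none available

-- ===== PRECONDITION & SPEC =====
def Spec_find_best_category_match_py (target : String) (available : List String) (out : Option String) : Prop := out = find_best_category_match_py_alt target available
instance (target : String) (available : List String) (out : Option String) : Decidable (Spec_find_best_category_match_py target available out) := by unfold Spec_find_best_category_match_py; infer_instance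

-- ===== CLAIM (what is proved, stated in full; the proofs are below) =====
def Claim_equal_find_best_category_match_py : Prop := ∀ (target : String) (available : List String), Dom_find_best_category_match_py target available → Spec_find_best_category_match_py target available (find_best_category_match_py target available)

-- ===== LEMMAS AND PROOFS =====

-- B's fused loop, characterised: first exact match wins; else the carried candidate; else first partial
theorem pvAltLoop_eq (tl : String) (cand : Option String) (xs : List String) :
    pvAltLoop tl cand xs =
      match xs.find? (fun cat => PySem.Str.lower cat == tl) with
      | some c => some c
      | none =>
          cand.orElse (fun _ => xs.find? (fun cat =>
            PySem.Str.isIn tl (PySem.Str.lower cat) ||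
            PySem.Str.isIn (PySem.Str.lower cat) tl)) := by
  induction xs generalizing cand with
  | nil => cases cand <;> rfl
  | cons cat rest ih =>
      simp only [pvAltLoop, List.find?]
      cases hex : (PySem.Str.lower cat == tl) with
      | true => simp
      | false =>
          simp only [Bool.false_eq_true, if_false]
          rw [ih]
          cases hfind : rest.find? (fun cat => PySem.Str.lower cat == tl) with
          | some c => rfl
          | none =>
              cases cand with
              | some c => rfl
              | none =>
                  cases hp : (PySem.Str.isIn tl (PySem.Str.lower cat) ||
                      PySem.Str.isIn (PySem.Str.lower cat) tl) with
                  | true => simp only [Option.isNone_none, Bool.true_and, if_true]; rfl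
                  | false => simp only [Option.isNone_none, Bool.true_and, Bool.false_eq_true,
                      if_false]

-- ===== VERDICT (by name: the statement is the Claim_ definition above) =====
theorem find_best_category_match_py_spec : Claim_equal_find_best_category_match_py := by
  intro target available _
  unfold Spec_find_best_category_match_py find_best_category_match_py find_best_category_match_py_alt
  rw [pvAltLoop_eq]
  cases hfind : available.find? (fun cat => PySem.Str.lower cat == PySem.Str.lower target) with
  | some c => simp [hfind]
  | none => simp [hfind, Option.orElse]
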